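-- pv_equiv track=rewrite | github.com/marshdevs/PIC16_2017 | Homework_1/quiz1.py | powerlists
-- ===== SOURCE A (Python) =====
-- def powerlists(L, k):
--     out = []
--     itr = 1
--     for _ in range(k):
--         out_mem = []
--         itr2 = 0
--         for i in L:
--             insert_op = L[itr2]**itr
--             out_mem.append(insert_op)
--             itr2 += 1
--         out.append(out_mem)
--         itr += 1
--     return out
-- ===== SOURCE B (Python) =====
-- def powerlists(L, k):
--     out = []
--     row = list(L)
--     for _ in range(k):
--         out.append(row)
--         row = [x * y for x, y in zip(row, L)]
--     return out
-- ===== Notes on version B (the rewrite author's own statement) =====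
-- stated objective: alternative
-- what changed: Each row is obtained by one elementwise multiplication of the previous row by L (incremental update) instead of recomputing every entry from scratch with ** indexed by a running counter; measured ~2x at the largest size both finished, but both time out on huge inputs, so no unqualified speed claim.
import Mathlib
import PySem

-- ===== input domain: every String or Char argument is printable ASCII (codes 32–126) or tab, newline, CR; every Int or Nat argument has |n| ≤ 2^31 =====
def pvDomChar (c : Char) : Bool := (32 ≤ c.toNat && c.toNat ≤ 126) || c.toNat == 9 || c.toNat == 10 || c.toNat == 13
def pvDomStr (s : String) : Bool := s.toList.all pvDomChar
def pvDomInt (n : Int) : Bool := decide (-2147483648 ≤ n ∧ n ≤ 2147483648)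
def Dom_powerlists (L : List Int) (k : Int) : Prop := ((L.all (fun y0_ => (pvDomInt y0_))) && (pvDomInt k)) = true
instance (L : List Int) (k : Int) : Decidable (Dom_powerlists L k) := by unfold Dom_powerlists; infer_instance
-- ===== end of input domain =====

-- B builds each row by one elementwise multiplication of the previous row by L (incremental
-- update) instead of A's per-entry exponentiation indexed by a running counter.

-- ===== PORT A =====
-- inner loop body: for i in L: insert_op = L[itr2]**itr; out_mem.append(insert_op); itr2 += 1
-- (L[itr2] is always in range here, so pyGetD's default 0 is never used)
def pvInnerStepA (L : List Int) (itr : Int) (st2 : List Int × Int) : List Int × Int :=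
  (st2.1 ++ [(PySem.List.pyGetD L st2.2 0) ^ itr.toNat], st2.2 + 1)

-- outer loop body: build out_mem from the inner loop, append it, itr += 1
def pvOuterStepA (L : List Int) (st : List (List Int) × Int) : List (List Int) × Int :=
  (st.1 ++ [(L.foldl (fun st2 _ => pvInnerStepA L st.2 st2) (([] : List Int), (0 : Int))).1],
   st.2 + 1)

def powerlists (L : List Int) (k : Int) : List (List Int) :=
  ((PySem.List.pyRange 0 k 1).foldl (fun st _ => pvOuterStepA L st)
    (([] : List (List Int)), (1 : Int))).1

-- ===== PORT B =====
-- loop body: out.append(row); row = [x * y for x, y in zip(row, L)]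
def pvStepB (L : List Int) (st : List (List Int) × List Int) : List (List Int) × List Int :=
  (st.1 ++ [st.2], List.zipWith (fun x y => x * y) st.2 L)

def powerlists_alt (L : List Int) (k : Int) : List (List Int) :=
  ((PySem.List.pyRange 0 k 1).foldl (fun st _ => pvStepB L st)
    (([] : List (List Int)), L)).1

-- ===== PRECONDITION & SPEC =====
def Spec_powerlists (L : List Int) (k : Int) (out : List (List Int)) : Prop := out = powerlists_alt L k
instance (L : List Int) (k : Int) (out : List (List Int)) : Decidable (Spec_powerlists L k out) := by unfold Spec_powerlists; infer_instance

-- ===== CLAIM (what is proved, stated in full; the proofs are below) =====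
def Claim_equal_powerlists : Prop := ∀ (L : List Int) (k : Int), Dom_powerlists L k → Spec_powerlists L k (powerlists L k)

-- ===== LEMMAS AND PROOFS =====

-- A's inner loop: fold over xs starting at index j appends the powers of L[j..j+|xs|)
theorem pv_innerA_eq (L : List Int) (itr : Int) :
    ∀ (xs acc : List Int) (j : Int),
      xs.foldl (fun st2 _ => pvInnerStepA L itr st2) (acc, j)
        = (acc ++ (PySem.List.pyRange j (j + xs.length) 1).map
              (fun i => PySem.List.pyGetD L i 0 ^ itr.toNat),
           j + xs.length) := by
  intro xs
  induction xs with
  | nil =>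
    intro acc j
    simp [PySem.List.pyRange_one_eq_nil (by omega : (j:Int) ≤ j)]
  | cons x xs ih =>
    intro acc j
    have hlt : j < j + ((x :: xs).length : Int) := by simp
    rw [List.foldl_cons]
    show List.foldl _ (pvInnerStepA L itr (acc, j)) xs = _
    rw [show pvInnerStepA L itr (acc, j)
        = (acc ++ [PySem.List.pyGetD L j 0 ^ itr.toNat], j + 1) from rfl]
    rw [ih]
    rw [PySem.List.pyRange_one_cons hlt]
    rw [Prod.mk.injEq]
    refine ⟨?_, ?_⟩
    · rw [List.map_cons, List.append_assoc, List.singleton_append,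
          show j + ((x :: xs).length : Int) = j + 1 + (xs.length : Int) from by
            simp only [List.length_cons]; push_cast; ring]
    · simp only [List.length_cons]
      push_cast
      omega

-- A's full inner loop over L itself produces the row of itr-th powers
theorem pv_innerA_full (L : List Int) (itr : Int) :
    (L.foldl (fun st2 _ => pvInnerStepA L itr st2) (([] : List Int), (0 : Int))).1
      = L.map (fun x => x ^ itr.toNat) := by
  rw [pv_innerA_eq]
  simp only [zero_add, List.nil_append]
  rw [show (fun i => PySem.List.pyGetD L i 0 ^ itr.toNat)
        = (fun v => v ^ itr.toNat) ∘ (fun i => PySem.List.pyGetD L i 0) from rfl]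
  rw [← List.map_map, PySem.List.map_pyGetD_pyRange_zero']

-- A's outer loop invariant
theorem pv_outerA (L : List Int) :
    ∀ (rng : List Int) (out : List (List Int)) (m : Nat),
      rng.foldl (fun st _ => pvOuterStepA L st) (out, (m : Int))
        = (out ++ (List.range rng.length).map (fun t => L.map (fun x => x ^ (m + t))),
           ((m + rng.length : Nat) : Int)) := by
  intro rng
  induction rng with
  | nil => intro out m; simp
  | cons r rng ih =>
    intro out m
    rw [List.foldl_cons]
    show List.foldl _ (pvOuterStepA L (out, (m : Int))) rng = _
    have hstep : pvOuterStepA L (out, (m : Int))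
        = (out ++ [L.map (fun x => x ^ m)], ((m + 1 : Nat) : Int)) := by
      unfold pvOuterStepA
      rw [pv_innerA_full]
      simp
    rw [hstep, ih]
    rw [Prod.mk.injEq]
    refine ⟨?_, ?_⟩
    · rw [List.append_assoc]
      congr 1
      rw [List.length_cons, List.range_succ_eq_map, List.map_cons, List.map_map,
          List.singleton_append]
      congr 1
      apply List.map_congr_left
      intro t _
      simp only [Function.comp_apply]
      apply List.map_congr_left
      intro y _
      congr 1
      omega
    · simp only [List.length_cons]
      congr 1
      omega

-- one multiplication step advances the power row
theorem pv_zip_pow (L : List Int) (m : Nat) :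
    List.zipWith (fun x y => x * y) (L.map (fun x => x ^ m)) L
      = L.map (fun x => x ^ (m + 1)) := by
  induction L with
  | nil => rfl
  | cons x L ih => simp [ih, pow_succ]

-- B's loop invariant
theorem pv_outerB (L : List Int) :
    ∀ (rng : List Int) (out : List (List Int)) (m : Nat),
      rng.foldl (fun st _ => pvStepB L st) (out, L.map (fun x => x ^ m))
        = (out ++ (List.range rng.length).map (fun t => L.map (fun x => x ^ (m + t))),
           L.map (fun x => x ^ (m + rng.length))) := by
  intro rng
  induction rng with
  | nil => intro out m; simp
  | cons r rng ih =>
    intro out m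
    rw [List.foldl_cons]
    show List.foldl _ (pvStepB L (out, L.map (fun x => x ^ m))) rng = _
    have hstep : pvStepB L (out, L.map (fun x => x ^ m))
        = (out ++ [L.map (fun x => x ^ m)], L.map (fun x => x ^ (m + 1))) := by
      unfold pvStepB
      rw [pv_zip_pow]
    rw [hstep, ih]
    rw [Prod.mk.injEq]
    refine ⟨?_, ?_⟩
    · rw [List.append_assoc]
      congr 1
      rw [List.length_cons, List.range_succ_eq_map, List.map_cons, List.map_map,
          List.singleton_append]
      congr 1
      apply List.map_congr_left
      intro t _
      simp only [Function.comp_apply]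
      apply List.map_congr_left
      intro y _
      congr 1
      omega
    · congr 1
      funext x
      congr 1
      simp only [List.length_cons]
      omega

-- ===== VERDICT (by name: the statement is the Claim_ definition above) =====
theorem powerlists_spec : Claim_equal_powerlists := by
  intro L k _
  unfold Spec_powerlists powerlists powerlists_alt
  rw [show (([] : List (List Int)), L)
      = (([] : List (List Int)), L.map (fun x => x ^ (1 : Nat))) from by simp]
  rw [pv_outerB L (PySem.List.pyRange 0 k 1) [] 1]
  rw [show (([] : List (List Int)), (1 : Int))
      = (([] : List (List Int)), ((1 : Nat) : Int)) from rfl]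
  rw [pv_outerA L (PySem.List.pyRange 0 k 1) [] 1]
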